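-- pv_equiv track=rewrite | github.com/Shenggg3/trendscope-app | YT調查.py | sort_models_by_version
-- ===== SOURCE A (Python) =====
-- def sort_models_by_version(models):
--     def score_model(name):
--         score = 0
--         if "gemini-1.5-flash" in name: score += 10000
--         elif "gemini-2.0" in name: score += 5000
--         elif "gemini-1.5-pro" in name: score += 1000
--         return score
--     valid_models = [m for m in models if "gemini" in m]
--     return sorted(valid_models, key=score_model, reverse=True)
-- ===== SOURCE B (Python) =====
-- def sort_models_by_version(models):
--     # One pass: partition into four priority buckets (input order preserved),
--     # then concatenate highest-priority first. Same result as the stable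
--     # reverse sort by score.
--     flash, v20, pro, rest = [], [], [], []
--     for m in models:
--         if "gemini" not in m:
--             continue
--         if "gemini-1.5-flash" in m:
--             flash.append(m)
--         elif "gemini-2.0" in m:
--             v20.append(m)
--         elif "gemini-1.5-pro" in m:
--             pro.append(m)
--         else:
--             rest.append(m)
--     return flash + v20 + pro + rest
-- ===== Notes on version B (the rewrite author's own statement) =====
-- stated objective: alternative
-- what changed: Replaces the comparison sort by score (sorted with reverse=True) with a single pass that partitions the gemini models into four ordered buckets and concatenates them highest-priority first, preserving the stable tie order.
import Mathlib
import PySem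

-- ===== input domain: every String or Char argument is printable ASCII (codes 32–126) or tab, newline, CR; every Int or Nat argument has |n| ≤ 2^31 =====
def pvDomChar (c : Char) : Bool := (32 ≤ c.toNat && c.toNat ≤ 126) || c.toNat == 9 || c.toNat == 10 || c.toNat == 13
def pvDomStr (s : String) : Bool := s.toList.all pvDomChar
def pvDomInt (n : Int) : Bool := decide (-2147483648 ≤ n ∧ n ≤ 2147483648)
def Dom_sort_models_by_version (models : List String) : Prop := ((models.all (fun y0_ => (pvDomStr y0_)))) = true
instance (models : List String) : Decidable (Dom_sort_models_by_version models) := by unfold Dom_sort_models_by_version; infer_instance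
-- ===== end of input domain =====

-- B replaces A's reverse comparison sort by a one-pass four-bucket partition (same result, including tie order).

-- ===== PORT A =====
-- Python A's nested helper score_model
def pvScoreModel (name : String) : Int :=
  let score : Int := 0
  let score :=
    if PySem.Str.isIn "gemini-1.5-flash" name then score + 10000
    else if PySem.Str.isIn "gemini-2.0" name then score + 5000
    else if PySem.Str.isIn "gemini-1.5-pro" name then score + 1000
    else score
  score

def sort_models_by_version (models : List String) : List String :=
  let valid_models := models.filter (fun m => PySem.Str.isIn "gemini" m)
  PySem.List.sorted valid_models pvScoreModel true

-- ===== PORT B =====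
-- Source B's loop body: route m into one of the four buckets (or skip it)
def pvStep (acc : List String × List String × List String × List String) (m : String) :
    List String × List String × List String × List String :=
  if !(PySem.Str.isIn "gemini" m) then acc
  else if PySem.Str.isIn "gemini-1.5-flash" m then (acc.1 ++ [m], acc.2.1, acc.2.2.1, acc.2.2.2)
  else if PySem.Str.isIn "gemini-2.0" m then (acc.1, acc.2.1 ++ [m], acc.2.2.1, acc.2.2.2)
  else if PySem.Str.isIn "gemini-1.5-pro" m then (acc.1, acc.2.1, acc.2.2.1 ++ [m], acc.2.2.2)
  else (acc.1, acc.2.1, acc.2.2.1, acc.2.2.2 ++ [m])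

def sort_models_by_version_alt (models : List String) : List String :=
  let r := models.foldl pvStep ([], [], [], [])
  r.1 ++ r.2.1 ++ r.2.2.1 ++ r.2.2.2

-- ===== PRECONDITION & SPEC =====
def Spec_sort_models_by_version (models : List String) (out : List String) : Prop := out = sort_models_by_version_alt models
instance (models : List String) (out : List String) : Decidable (Spec_sort_models_by_version models out) := by unfold Spec_sort_models_by_version; infer_instance

-- ===== CLAIM (what is proved, stated in full; the proofs are below) =====
def Claim_equal_sort_models_by_version : Prop := ∀ (models : List String), Dom_sort_models_by_version models → Spec_sort_models_by_version models (sort_models_by_version models)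

-- ===== LEMMAS AND PROOFS =====

-- the priority tier of a model name (3 highest … 0 lowest)
def pvTier (m : String) : Nat :=
  if PySem.Str.isIn "gemini-1.5-flash" m then 3
  else if PySem.Str.isIn "gemini-2.0" m then 2
  else if PySem.Str.isIn "gemini-1.5-pro" m then 1
  else 0

def pvTierFilter (k : Nat) (xs : List String) : List String :=
  xs.filter (fun m => pvTier m == k)

def pvBucket (k : Nat) (xs : List String) : List String :=
  pvTierFilter k (xs.filter (fun m => PySem.Str.isIn "gemini" m))

lemma pvScore_lt_iff (a b : String) : pvScoreModel a < pvScoreModel b ↔ pvTier a < pvTier b := by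
  unfold pvScoreModel pvTier
  split_ifs <;> simp

lemma pvTier_cases (m : String) : pvTier m = 3 ∨ pvTier m = 2 ∨ pvTier m = 1 ∨ pvTier m = 0 := by
  unfold pvTier; split_ifs <;> simp

lemma pvInsertBy_append_left (before : String → String → Bool) (x : String) (hi lo : List String)
    (h : ∀ y ∈ hi, before x y = false) :
    PySem.List.insertBy before x (hi ++ lo) = hi ++ PySem.List.insertBy before x lo := by
  induction hi with
  | nil => simp
  | cons y ys ih =>
    simp only [List.cons_append, PySem.List.insertBy, h y (by simp)]
    simp only [Bool.false_eq_true, if_false, List.cons.injEq, true_and]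
    exact ih (fun z hz => h z (by simp [hz]))

lemma pvInsertBy_all_true (before : String → String → Bool) (x : String) (lo : List String)
    (h : ∀ y ∈ lo, before x y = true) :
    PySem.List.insertBy before x lo = x :: lo := by
  cases lo with
  | nil => rfl
  | cons y ys => simp [PySem.List.insertBy, h y (by simp)]

lemma pvMem_tierFilter {k : Nat} {xs : List String} {y : String} (h : y ∈ pvTierFilter k xs) :
    pvTier y = k := by
  have := List.of_mem_filter h
  simpa using this

lemma pvFoldl_insert_eq (ys : List String) :
    List.foldl (fun acc x => PySem.List.insertBy (fun a b => decide (pvScoreModel b < pvScoreModel a)) x acc) [] ys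
    = pvTierFilter 3 ys ++ pvTierFilter 2 ys ++ pvTierFilter 1 ys ++ pvTierFilter 0 ys := by
  induction ys using List.reverseRecOn with
  | nil => simp [pvTierFilter]
  | append_singleton ys x ih =>
    rw [List.foldl_append, List.foldl_cons, List.foldl_nil, ih]
    have hfil : ∀ k, pvTierFilter k (ys ++ [x]) =
        pvTierFilter k ys ++ (if pvTier x == k then [x] else []) := by
      intro k
      by_cases h : pvTier x = k
      · have hb : (pvTier x == k) = true := by simp [h]
        simp [pvTierFilter, List.filter_append, List.filter, hb]
      · have hb : (pvTier x == k) = false := by simp [h]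
        simp [pvTierFilter, List.filter_append, List.filter, hb]
    have hfalse : ∀ (t : Nat) (y : String), pvTier x = t → pvTier y ≥ t →
        (fun a b => decide (pvScoreModel b < pvScoreModel a)) x y = false := by
      intro t y hx hy
      simp only [decide_eq_false_iff_not, pvScore_lt_iff, hx]
      omega
    have htrue : ∀ (t : Nat) (y : String), pvTier x = t → pvTier y < t →
        (fun a b => decide (pvScoreModel b < pvScoreModel a)) x y = true := by
      intro t y hx hy
      simp only [decide_eq_true_eq, pvScore_lt_iff, hx]
      omega
    rcases pvTier_cases x with hx | hx | hx | hx
    · -- tier 3: x goes at the end of the first bucket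
      rw [show pvTierFilter 3 ys ++ pvTierFilter 2 ys ++ pvTierFilter 1 ys ++ pvTierFilter 0 ys
            = pvTierFilter 3 ys ++ (pvTierFilter 2 ys ++ pvTierFilter 1 ys ++ pvTierFilter 0 ys) from by simp,
          pvInsertBy_append_left _ x _ _
            (fun y hy => hfalse 3 y hx (by rw [pvMem_tierFilter hy])),
          pvInsertBy_all_true _ x _ (by
            intro y hy
            simp only [List.mem_append] at hy
            rcases hy with (h | h) | h <;>
              exact htrue 3 y hx (by have := pvMem_tierFilter h; omega))]
      simp [hfil, hx]
    · -- tier 2: after the first two buckets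
      rw [show pvTierFilter 3 ys ++ pvTierFilter 2 ys ++ pvTierFilter 1 ys ++ pvTierFilter 0 ys
            = (pvTierFilter 3 ys ++ pvTierFilter 2 ys) ++ (pvTierFilter 1 ys ++ pvTierFilter 0 ys) from by simp,
          pvInsertBy_append_left _ x _ _ (by
            intro y hy
            simp only [List.mem_append] at hy
            rcases hy with h | h <;>
              exact hfalse 2 y hx (by have := pvMem_tierFilter h; omega)),
          pvInsertBy_all_true _ x _ (by
            intro y hy
            simp only [List.mem_append] at hy
            rcases hy with h | h <;>
              exact htrue 2 y hx (by have := pvMem_tierFilter h; omega))]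
      simp [hfil, hx]
    · -- tier 1
      rw [show pvTierFilter 3 ys ++ pvTierFilter 2 ys ++ pvTierFilter 1 ys ++ pvTierFilter 0 ys
            = (pvTierFilter 3 ys ++ pvTierFilter 2 ys ++ pvTierFilter 1 ys) ++ pvTierFilter 0 ys from by simp,
          pvInsertBy_append_left _ x _ _ (by
            intro y hy
            simp only [List.mem_append] at hy
            rcases hy with (h | h) | h <;>
              exact hfalse 1 y hx (by have := pvMem_tierFilter h; omega)),
          pvInsertBy_all_true _ x _ (fun y hy =>
            htrue 1 y hx (by have := pvMem_tierFilter hy; omega))]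
      simp [hfil, hx]
    · -- tier 0: goes at the very end
      rw [PySem.List.insertBy_of_forall_not_before _ x _ (by
            intro y hy
            simp only [List.mem_append] at hy
            rcases hy with ((h | h) | h) | h <;>
              exact hfalse 0 y hx (by have := pvMem_tierFilter h; omega))]
      simp [hfil, hx]

lemma pvFoldl_step_eq (xs : List String) (a b c d : List String) :
    List.foldl pvStep (a, b, c, d) xs =
      (a ++ pvBucket 3 xs, b ++ pvBucket 2 xs, c ++ pvBucket 1 xs, d ++ pvBucket 0 xs) := by
  induction xs generalizing a b c d with
  | nil => simp [pvBucket, pvTierFilter]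
  | cons m xs ih =>
    have hb : ∀ k, pvBucket k (m :: xs) =
        (if PySem.Str.isIn "gemini" m ∧ pvTier m = k then [m] else []) ++ pvBucket k xs := by
      intro k
      by_cases h1 : PySem.Str.isIn "gemini" m = true
      · have h1c : PySem.Chars.isIn ['g','e','m','i','n','i'] m.toList = true := by simpa using h1
        by_cases h2 : pvTier m = k
        · have hbq : (pvTier m == k) = true := by simp [h2]
          simp [pvBucket, pvTierFilter, List.filter, h1c, hbq, h2]
        · have hbq : (pvTier m == k) = false := by simp [h2]
          simp [pvBucket, pvTierFilter, List.filter, h1c, h2]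
      · have h1c : PySem.Chars.isIn ['g','e','m','i','n','i'] m.toList = false := by
          simpa using h1
        simp [pvBucket, pvTierFilter, List.filter, h1c]
    by_cases hg : PySem.Str.isIn "gemini" m
    · have hg' : PySem.Chars.isIn ['g','e','m','i','n','i'] m.toList = true := by
        simpa using hg
      rcases pvTier_cases m with hm | hm | hm | hm
      · have hf : PySem.Str.isIn "gemini-1.5-flash" m = true := by
          unfold pvTier at hm; split_ifs at hm <;> simp_all
        have hf1 : PySem.Chars.isIn ['g','e','m','i','n','i','-','1','.','5','-','f','l','a','s','h'] m.toList = true := by simpa using hf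
        rw [List.foldl_cons, show pvStep (a, b, c, d) m = (a ++ [m], b, c, d) from by
              simp [pvStep, hg', hf1], ih]
        simp [hb, hg', hm]
      · have hf : PySem.Str.isIn "gemini-1.5-flash" m = false ∧
            PySem.Str.isIn "gemini-2.0" m = true := by
          unfold pvTier at hm; split_ifs at hm <;> simp_all
        have hf1 : PySem.Chars.isIn ['g','e','m','i','n','i','-','1','.','5','-','f','l','a','s','h'] m.toList = false := by simpa using hf.1
        have hf2 : PySem.Chars.isIn ['g','e','m','i','n','i','-','2','.','0'] m.toList = true := by simpa using hf.2
        rw [List.foldl_cons, show pvStep (a, b, c, d) m = (a, b ++ [m], c, d) from by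
              simp [pvStep, hg', hf1, hf2], ih]
        simp [hb, hg', hm]
      · have hf : PySem.Str.isIn "gemini-1.5-flash" m = false ∧
            PySem.Str.isIn "gemini-2.0" m = false ∧
            PySem.Str.isIn "gemini-1.5-pro" m = true := by
          unfold pvTier at hm; split_ifs at hm <;> simp_all
        have hf1 : PySem.Chars.isIn ['g','e','m','i','n','i','-','1','.','5','-','f','l','a','s','h'] m.toList = false := by simpa using hf.1
        have hf2 : PySem.Chars.isIn ['g','e','m','i','n','i','-','2','.','0'] m.toList = false := by simpa using hf.2.1
        have hf3 : PySem.Chars.isIn ['g','e','m','i','n','i','-','1','.','5','-','p','r','o'] m.toList = true := by simpa using hf.2.2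
        rw [List.foldl_cons, show pvStep (a, b, c, d) m = (a, b, c ++ [m], d) from by
              simp [pvStep, hg', hf1, hf2, hf3], ih]
        simp [hb, hg', hm]
      · have hf : PySem.Str.isIn "gemini-1.5-flash" m = false ∧
            PySem.Str.isIn "gemini-2.0" m = false ∧
            PySem.Str.isIn "gemini-1.5-pro" m = false := by
          unfold pvTier at hm; split_ifs at hm <;> simp_all
        have hf1 : PySem.Chars.isIn ['g','e','m','i','n','i','-','1','.','5','-','f','l','a','s','h'] m.toList = false := by simpa using hf.1
        have hf2 : PySem.Chars.isIn ['g','e','m','i','n','i','-','2','.','0'] m.toList = false := by simpa using hf.2.1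
        have hf3 : PySem.Chars.isIn ['g','e','m','i','n','i','-','1','.','5','-','p','r','o'] m.toList = false := by simpa using hf.2.2
        rw [List.foldl_cons, show pvStep (a, b, c, d) m = (a, b, c, d ++ [m]) from by
              simp [pvStep, hg', hf1, hf2, hf3], ih]
        simp [hb, hg', hm]
    · have hg' : PySem.Chars.isIn ['g','e','m','i','n','i'] m.toList = false := by
        simpa using hg
      rw [List.foldl_cons, show pvStep (a, b, c, d) m = (a, b, c, d) from by simp [pvStep, hg'], ih]
      simp [hb, hg']

-- ===== VERDICT (by name: the statement is the Claim_ definition above) =====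
theorem sort_models_by_version_spec : Claim_equal_sort_models_by_version := by
  intro models _
  unfold Spec_sort_models_by_version sort_models_by_version sort_models_by_version_alt
  rw [PySem.List.sorted_rev_eq_foldl_insertBy, pvFoldl_insert_eq, pvFoldl_step_eq]
  simp [pvBucket]
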